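-- pv_equiv track=rewrite | github.com/Arsen1302/Code-copy-detector | TestData/solutions/problem_1662_3_1.py | solution_1662_3_1
-- ===== SOURCE A (Python) =====
-- from typing import List
--
-- def solution_1662_3_1(n: int, meetings: List[List[int]]) -> int:
--     meetings.sort()
--     rooms = [0] * n
--     def solution_1662_3_2(meeting):
--         result = None
--         for i in range(n):
--             if rooms[i] <= meeting[0]:
--                 rooms[i] = meeting[1]
--                 result = i
--                 break
--         if result is None:
--             minVal = min(rooms)
--             result = rooms.index(minVal)
--             rooms[result] += meeting[1] - meeting[0]
--         return result
--
--     frequences = [0] * n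
--     for meeting in meetings:
--         index = solution_1662_3_2(meeting)
--         frequences[index] += 1
--     return frequences.index(max(frequences))
-- ===== SOURCE B (Python) =====
-- from typing import List
--
-- def _ins(xs, x):
--     # insert x into an ascending list, keeping it sorted (ints or tuples)
--     for i in range(len(xs)):
--         if x < xs[i]:
--             return xs[:i] + [x] + xs[i:]
--     return xs + [x]
--
-- def solution_1662_3_1(n: int, meetings: List[List[int]]) -> int:
--     # Event simulation over two ordered collections instead of scanning all rooms
--     # per meeting: `busy` holds (end_time, room) ascending, `free` holds released
--     # room indices ascending; finished rooms migrate from busy to free lazily.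
--     busy = [(0, j) for j in range(n)]
--     free = []
--     freq = [0] * n
--     for m in sorted(meetings):
--         s, e = m[0], m[1]
--         while busy and busy[0][0] <= s:     # release rooms that finished by s
--             free = _ins(free, busy[0][1])
--             busy = busy[1:]
--         if free:
--             j = free[0]                     # lowest-index available room
--             free = free[1:]
--             busy = _ins(busy, (e, j))
--         else:
--             end, j = busy[0]                # earliest-ending (then lowest-index) room
--             busy = _ins(busy[1:], (end + e - s, j))
--         freq[j] += 1
--     return freq.index(max(freq))
-- ===== Notes on version B (the rewrite author's own statement) =====
-- stated objective: alternative
-- what changed: Instead of A's per-meeting scan over the whole rooms array (first-fit loop plus separate min()/index() passes), B runs an event simulation with two ordered collections: a `busy` list of (end_time, room) pairs and a `free` list of released room indices, lazily migrating finished rooms from busy to free and always taking the head of the relevant collection.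
import Mathlib
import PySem

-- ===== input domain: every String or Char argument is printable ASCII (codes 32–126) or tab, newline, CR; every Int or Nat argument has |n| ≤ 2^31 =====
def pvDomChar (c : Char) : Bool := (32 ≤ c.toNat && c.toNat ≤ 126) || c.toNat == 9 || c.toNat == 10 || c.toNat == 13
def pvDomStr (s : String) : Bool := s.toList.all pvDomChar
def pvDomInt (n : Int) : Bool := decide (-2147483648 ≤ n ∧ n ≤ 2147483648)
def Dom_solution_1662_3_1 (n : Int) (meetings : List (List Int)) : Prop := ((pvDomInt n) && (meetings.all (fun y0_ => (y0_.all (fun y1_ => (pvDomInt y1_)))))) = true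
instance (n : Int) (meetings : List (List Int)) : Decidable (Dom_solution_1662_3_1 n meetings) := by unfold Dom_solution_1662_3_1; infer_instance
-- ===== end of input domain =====

-- B replaces A's per-meeting scan over ALL n rooms (first-fit pass + min()/index() fallback over
-- the rooms array) by an event simulation over two ordered collections: `busy` (end,room) pairs
-- ascending and `free` released room indices ascending, rooms migrating between them
-- (objective: alternative).  Python A sorts `meetings` in place; B does not mutate it — the
-- equivalence proved here is about the RETURN value only.

-- ===== PORT A =====
-- helper solution_1662_3_2: the loop `for i in range(n): if rooms[i] <= meeting[0]: … break`
-- ported as findIdx? over rooms (rooms has length n, indices 0..n-1 in order, first hit wins);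
-- `min(rooms)` / `rooms.index(minVal)` via PySem.List.min? / index? (getD defaults unreachable
-- under Pre_: rooms is nonempty and the index is in range).
def pvStepA (s e : Int) (rooms : List Int) : List Int × Nat :=
  match List.findIdx? (fun r => decide (r ≤ s)) rooms with
  | some i => (rooms.set i e, i)
  | none =>
    let mv := (PySem.List.min? rooms (fun x => x)).getD 0
    let i := (PySem.List.index? rooms mv).getD 0
    (rooms.set i (rooms.getD i 0 + (e - s)), i)

def pvFoldA (st : List Int × List Int) (m : List Int) : List Int × List Int :=
  let p := pvStepA (m.getD 0 0) (m.getD 1 0) st.1       -- meeting[0], meeting[1] (length ≥ 2 by Pre_)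
  (p.1, st.2.set p.2 (st.2.getD p.2 0 + 1))             -- frequences[index] += 1

def solution_1662_3_1 (n : Int) (meetings : List (List Int)) : Int :=
  let ms := PySem.List.sorted meetings (fun x => x) false   -- meetings.sort()
  let st := ms.foldl pvFoldA
    (List.replicate n.toNat 0, List.replicate n.toNat 0)    -- rooms, frequences = [0]*n
  let mx := (PySem.List.max? st.2 (fun x => x)).getD 0      -- max(frequences)
  ((PySem.List.index? st.2 mx).getD 0 : Nat)                -- frequences.index(…)

-- ===== PORT B =====
-- Python's `_ins(xs, x)`: insert x into an ascending list; the Lean port takes the Boolean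
-- comparison explicitly because Python's one polymorphic `<` is used at two types
-- (ints, and tuples compared lexicographically — NOT Lean's pointwise Prod order).
def pvLtN (a b : Nat) : Bool := decide (a < b)
def pvLtP (a b : Int × Nat) : Bool := decide (a.1 < b.1 ∨ (a.1 = b.1 ∧ a.2 < b.2))

def pvIns {α : Type} (lt : α → α → Bool) : List α → α → List α
  | [], x => [x]
  | y :: ys, x => if lt x y then x :: y :: ys else y :: pvIns lt ys x

-- the `while busy and busy[0][0] <= s:` release loop
def pvRelease (s : Int) : List (Int × Nat) → List Nat → List (Int × Nat) × List Nat
  | [], free => ([], free)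
  | p :: rest, free =>
    if p.1 ≤ s then pvRelease s rest (pvIns pvLtN free p.2) else (p :: rest, free)

def pvStepB (st : List (Int × Nat) × List Nat × List Int) (m : List Int) :
    List (Int × Nat) × List Nat × List Int :=
  let s := m.getD 0 0
  let e := m.getD 1 0
  let rel := pvRelease s st.1 st.2.1
  match rel.2 with
  | j :: rest =>                                       -- lowest-index free room
    (pvIns pvLtP rel.1 (e, j), rest, st.2.2.set j (st.2.2.getD j 0 + 1))
  | [] =>
    match rel.1 with
    | (en, j) :: brest =>                              -- earliest-ending busy room
      (pvIns pvLtP brest (en + e - s, j), [], st.2.2.set j (st.2.2.getD j 0 + 1))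
    | [] => ([], [], st.2.2)                           -- unreachable under Pre_ (n ≥ 1)

def solution_1662_3_1_alt (n : Int) (meetings : List (List Int)) : Int :=
  let st := (PySem.List.sorted meetings (fun x => x) false).foldl pvStepB
    ((List.range n.toNat).map (fun j => ((0 : Int), j)), ([] : List Nat),
      List.replicate n.toNat (0 : Int))
  let freq := st.2.2
  ((PySem.List.index? freq ((PySem.List.max? freq (fun x => x)).getD 0)).getD 0 : Nat)

-- ===== PRECONDITION & SPEC =====
-- Pre_ is exactly where Python A returns: n ≥ 1 (n ≤ 0 makes rooms/frequences empty, so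
-- min()/max() raise ValueError) and every meeting row has ≥ 2 entries (meeting[0]/meeting[1]
-- raise IndexError otherwise).
def Pre_solution_1662_3_1 (n : Int) (meetings : List (List Int)) : Prop :=
  1 ≤ n ∧ ∀ m ∈ meetings, 2 ≤ m.length
instance (n : Int) (meetings : List (List Int)) : Decidable (Pre_solution_1662_3_1 n meetings) := by
  unfold Pre_solution_1662_3_1; infer_instance

def pvWitness_solution_1662_3_1 : Int × List (List Int) := (2, [[0, 10], [1, 5], [2, 7], [3, 4]])

def Spec_solution_1662_3_1 (n : Int) (meetings : List (List Int)) (out : Int) : Prop := out = solution_1662_3_1_alt n meetings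
instance (n : Int) (meetings : List (List Int)) (out : Int) : Decidable (Spec_solution_1662_3_1 n meetings out) := by unfold Spec_solution_1662_3_1; infer_instance

-- ===== CLAIM (what is proved, stated in full; the proofs are below) =====
def Claim_equal_solution_1662_3_1 : Prop := ∀ (n : Int) (meetings : List (List Int)), Dom_solution_1662_3_1 n meetings → Pre_solution_1662_3_1 n meetings → Spec_solution_1662_3_1 n meetings (solution_1662_3_1 n meetings)

-- ===== LEMMAS AND PROOFS =====

-- getD after set
theorem pv_getD_set_self {l : List Int} {i : Nat} (h : i < l.length) (v : Int) :
    (l.set i v).getD i 0 = v := by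
  rw [List.getD_eq_getElem _ _ (by simpa using h), List.getElem_set]
  simp

theorem pv_getD_set_ne {l : List Int} {i k : Nat} (h : i ≠ k) (v : Int) :
    (l.set i v).getD k 0 = l.getD k 0 := by
  by_cases hk : k < l.length
  · rw [List.getD_eq_getElem _ _ (by simpa using hk), List.getD_eq_getElem _ _ hk,
      List.getElem_set, if_neg h]
  · rw [List.getD_eq_default _ _ (by simpa using Nat.le_of_not_lt hk),
      List.getD_eq_default _ _ (Nat.le_of_not_lt hk)]

-- pvIns is x :: ys up to permutation
theorem pvIns_perm {α : Type} (lt : α → α → Bool) (x : α) :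
    ∀ ys : List α, (pvIns lt ys x).Perm (x :: ys)
  | [] => .refl _
  | y :: ys => by
    unfold pvIns
    split
    · exact .refl _
    · exact ((pvIns_perm lt x ys).cons y).trans (List.Perm.swap x y ys)

theorem pvIns_pairwise {α : Type} (lt : α → α → Bool)
    (htrans : ∀ a b c, lt a b = true → lt b c = true → lt a c = true) (x : α) :
    ∀ ys : List α, ys.Pairwise (fun a b => lt a b = true) →
      (∀ y ∈ ys, lt x y = true ∨ lt y x = true) →
      (pvIns lt ys x).Pairwise (fun a b => lt a b = true)
  | [], _, _ => by simp [pvIns]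
  | y :: ys, hp, hc => by
    unfold pvIns
    rcases List.pairwise_cons.mp hp with ⟨hy, hys⟩
    split
    next h =>
      refine List.pairwise_cons.mpr ⟨?_, hp⟩
      intro z hz
      rcases List.mem_cons.mp hz with rfl | hz
      · exact h
      · exact htrans x y z h (hy z hz)
    next h =>
      have hyx : lt y x = true := by
        rcases hc y (by simp) with h' | h'
        · exact absurd h' (by simpa using h)
        · exact h'
      refine List.pairwise_cons.mpr
        ⟨?_, pvIns_pairwise lt htrans x ys hys (fun z hz => hc z (by simp [hz]))⟩
      intro z hz
      rcases List.mem_cons.mp ((pvIns_perm lt x ys).mem_iff.mp hz) with rfl | hz'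
      · exact hyx
      · exact hy z hz'

theorem pvLtP_trans (a b c : Int × Nat) (h1 : pvLtP a b = true) (h2 : pvLtP b c = true) :
    pvLtP a c = true := by
  simp only [pvLtP, decide_eq_true_eq] at *; omega

theorem pvLtN_trans (a b c : Nat) (h1 : pvLtN a b = true) (h2 : pvLtN b c = true) :
    pvLtN a c = true := by
  simp only [pvLtN, decide_eq_true_eq] at *; omega

-- the simulation invariant: A's rooms array vs B's (busy, free) collections at "time" t
-- (t = the start of the last processed meeting; starts are nondecreasing)
def pvRel (rooms : List Int) (busy : List (Int × Nat)) (free : List Nat) (t : Int) : Prop :=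
  (∀ p ∈ busy, rooms.getD p.2 0 = p.1) ∧
  (∀ j ∈ free, rooms.getD j 0 ≤ t) ∧
  busy.Pairwise (fun a b => pvLtP a b = true) ∧
  free.Pairwise (fun a b => pvLtN a b = true) ∧
  (free ++ busy.map Prod.snd).Perm (List.range rooms.length)

theorem pvRel_mono {rooms busy free t s} (h : pvRel rooms busy free t) (hts : t ≤ s) :
    pvRel rooms busy free s :=
  ⟨h.1, fun j hj => le_trans (h.2.1 j hj) hts, h.2.2⟩

theorem pvRelease_spec (s : Int) (rooms : List Int) :
    ∀ (busy : List (Int × Nat)) (free : List Nat), pvRel rooms busy free s →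
      pvRel rooms (pvRelease s busy free).1 (pvRelease s busy free).2 s ∧
      ∀ p ∈ (pvRelease s busy free).1, ¬ p.1 ≤ s
  | [], free, h => by simpa [pvRelease] using h
  | p :: rest, free, h => by
    obtain ⟨h1, h2, h3, h4, h5⟩ := h
    rcases List.pairwise_cons.mp h3 with ⟨hp, hrest⟩
    unfold pvRelease
    split
    next hps =>
      -- release p.2 into free
      have hnodup : (free ++ (p :: rest).map Prod.snd).Nodup :=
        h5.symm.nodup List.nodup_range
      have hpnotfree : ∀ j ∈ free, j ≠ p.2 := by
        intro j hj
        have := (List.disjoint_of_nodup_append hnodup) hj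
        simp only [List.map_cons, List.mem_cons] at this
        intro he; exact this (Or.inl he)
      refine pvRelease_spec s rooms rest (pvIns pvLtN free p.2) ⟨?_, ?_, hrest, ?_, ?_⟩
      · exact fun q hq => h1 q (by simp [hq])
      · intro j hj
        rcases List.mem_cons.mp ((pvIns_perm pvLtN p.2 free).mem_iff.mp hj) with rfl | hj'
        · rw [h1 p (by simp)]; exact hps
        · exact h2 j hj'
      · refine pvIns_pairwise pvLtN pvLtN_trans p.2 free h4 ?_
        intro y hy
        have := hpnotfree y hy
        simp only [pvLtN, decide_eq_true_eq]
        omega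
      · refine List.Perm.trans ?_ h5
        refine ((pvIns_perm pvLtN p.2 free).append_right _).trans ?_
        simpa using (List.perm_middle (a := p.2) (l₁ := free) (l₂ := rest.map Prod.snd)).symm
    next hps =>
      refine ⟨⟨h1, h2, h3, h4, h5⟩, ?_⟩
      intro q hq
      rcases List.mem_cons.mp hq with rfl | hq'
      · exact hps
      · have := hp q hq'
        simp only [pvLtP, decide_eq_true_eq] at this
        intro hc; apply hps; omega

-- one meeting: B's step picks the same room as A's `solution_1662_3_2` and keeps the invariant
theorem pvStep_eq (rooms : List Int) (busy : List (Int × Nat)) (free : List Nat)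
    (freq : List Int) (t : Int) (m : List Int)
    (hrel : pvRel rooms busy free t) (hts : t ≤ m.getD 0 0) (hne : rooms ≠ []) :
    (pvStepB (busy, free, freq) m).2.2 =
      freq.set (pvStepA (m.getD 0 0) (m.getD 1 0) rooms).2
        (freq.getD (pvStepA (m.getD 0 0) (m.getD 1 0) rooms).2 0 + 1) ∧
    pvRel (pvStepA (m.getD 0 0) (m.getD 1 0) rooms).1
      (pvStepB (busy, free, freq) m).1 (pvStepB (busy, free, freq) m).2.1 (m.getD 0 0) := by
  set s := m.getD 0 0 with hs
  set e := m.getD 1 0 with he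
  obtain ⟨hrel', hgt⟩ := pvRelease_spec s rooms busy free (pvRel_mono hrel hts)
  set b1 := (pvRelease s busy free).1 with hb1
  set f1 := (pvRelease s busy free).2 with hf1
  obtain ⟨h1, h2, h3, h4, h5⟩ := hrel'
  have hnodup : (f1 ++ b1.map Prod.snd).Nodup := h5.symm.nodup List.nodup_range
  have hmem : ∀ j, j < rooms.length ↔ (j ∈ f1 ∨ j ∈ b1.map Prod.snd) := by
    intro j
    rw [← List.mem_range, ← h5.mem_iff, List.mem_append]
  cases hcase : f1 with
  | cons j rest =>
    -- a free room exists: A's first-fit finds exactly j (the least released index)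
    have hjlen : j < rooms.length := (hmem j).mpr (Or.inl (by simp [hcase]))
    have hfind : List.findIdx? (fun r => decide (r ≤ s)) rooms = some j := by
      rw [List.findIdx?_eq_some_iff_findIdx_eq]
      refine ⟨hjlen, (List.findIdx_eq hjlen).mpr ⟨?_, ?_⟩⟩
      · have := h2 j (by simp [hcase])
        rw [List.getD_eq_getElem _ _ hjlen] at this
        simpa using this
      · intro i hij
        have hilen : i < rooms.length := by omega
        simp only [decide_eq_false_iff_not, not_le]
        by_contra hc
        push_neg at hc
        -- rooms[i] ≤ s, so i is free or a busy room with end ≤ s (impossible)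
        have hile : rooms.getD i 0 ≤ s := by
          rw [List.getD_eq_getElem _ _ hilen]; omega
        rcases (hmem i).mp hilen with hif | hib
        · -- i ∈ f1 = j :: rest, all of rest > j, so i ≥ j, contradiction with i < j
          rw [hcase] at hif h4
          rcases List.mem_cons.mp hif with rfl | hir
          · omega
          · have := (List.pairwise_cons.mp h4).1 i hir
            simp only [pvLtN, decide_eq_true_eq] at this
            omega
        · obtain ⟨p, hpmem, hpsnd⟩ := List.mem_map.mp hib
          have := hgt p hpmem
          rw [← hpsnd] at hile
          rw [h1 p hpmem] at hile
          exact this hile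
    have hA : pvStepA s e rooms = (rooms.set j e, j) := by rw [pvStepA, hfind]
    have hB : pvStepB (busy, free, freq) m =
        (pvIns pvLtP b1 (e, j), rest, freq.set j (freq.getD j 0 + 1)) := by
      rw [pvStepB]; simp only [← hs, ← he, ← hb1, ← hf1, hcase]
    rw [hA, hB]
    have hjnotb : ∀ p ∈ b1, p.2 ≠ j := by
      intro p hp hc
      have := (List.disjoint_of_nodup_append hnodup) (show j ∈ f1 by simp [hcase])
      exact this (List.mem_map.mpr ⟨p, hp, hc⟩)
    refine ⟨rfl, ?_, ?_, ?_, ?_, ?_⟩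
    · -- busy values
      intro p hp
      rcases List.mem_cons.mp ((pvIns_perm pvLtP (e, j) b1).mem_iff.mp hp) with rfl | hp'
      · exact pv_getD_set_self hjlen e
      · rw [pv_getD_set_ne (fun hc => hjnotb p hp' hc.symm) e]
        exact h1 p hp'
    · -- free values still ≤ s
      intro i hi
      have hif : i ∈ f1 := by simp [hcase, hi]
      have hij : j ≠ i := by
        rw [hcase] at h4
        have := (List.pairwise_cons.mp h4).1 i hi
        simp only [pvLtN, decide_eq_true_eq] at this
        omega
      rw [pv_getD_set_ne hij e]
      exact h2 i hif
    · -- busy sorted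
      refine pvIns_pairwise pvLtP pvLtP_trans (e, j) b1 h3 ?_
      intro y hy
      have := hjnotb y hy
      simp only [pvLtP, decide_eq_true_eq]
      omega
    · exact (List.pairwise_cons.mp (hcase ▸ h4)).2
    · -- partition
      rw [List.length_set]
      refine List.Perm.trans ?_ h5
      refine (List.Perm.append_left rest ((pvIns_perm pvLtP (e, j) b1).map Prod.snd)).trans ?_
      rw [hcase]
      simpa using (List.perm_middle (a := j) (l₁ := rest) (l₂ := b1.map Prod.snd))
  | nil =>
    -- no free room: A falls back to the min room; B pops the head of busy
    have hfind : List.findIdx? (fun r => decide (r ≤ s)) rooms = none := by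
      rw [List.findIdx?_eq_none_iff]
      intro x hx
      obtain ⟨i, hilen, hieq⟩ := List.mem_iff_getElem.mp hx
      simp only [decide_eq_false_iff_not, not_le]
      by_contra hc
      push_neg at hc
      rcases (hmem i).mp hilen with hif | hib
      · rw [hcase] at hif; simp at hif
      · obtain ⟨p, hpmem, hpsnd⟩ := List.mem_map.mp hib
        apply hgt p hpmem
        rw [← h1 p hpmem, hpsnd, List.getD_eq_getElem _ _ hilen, hieq]
        omega
    cases hbcase : b1 with
    | nil =>
      -- impossible: every index < rooms.length would be in [] ++ []
      exfalso
      have hlen : 0 < rooms.length := List.length_pos_iff.mpr hne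
      have := (hmem 0).mp hlen
      rw [hcase, hbcase] at this; simp at this
    | cons hd brest =>
      obtain ⟨en, j⟩ := hd
      have hjval : rooms.getD j 0 = en := h1 (en, j) (by simp [hbcase])
      have hjlen : j < rooms.length := by
        have : j ∈ b1.map Prod.snd := by rw [hbcase]; simp
        exact (hmem j).mpr (Or.inr this)
      have hmin : ∀ i (hi : i < rooms.length), en ≤ rooms[i] := by
        intro i hi
        have hib : i ∈ b1.map Prod.snd := by
          rcases (hmem i).mp hi with hif | hib
          · rw [hcase] at hif; simp at hif
          · exact hib
        obtain ⟨p, hpmem, hpsnd⟩ := List.mem_map.mp hib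
        have hval : rooms.getD i 0 = p.1 := by rw [← hpsnd]; exact h1 p hpmem
        have hle : en ≤ p.1 := by
          rw [hbcase] at hpmem
          rcases List.mem_cons.mp hpmem with heq | hp'
          · rw [heq]
          · have hlt := (List.pairwise_cons.mp (hbcase ▸ h3)).1 p hp'
            simp only [pvLtP, decide_eq_true_eq] at hlt
            omega
        rw [List.getD_eq_getElem _ _ hi] at hval
        omega
      have hminfirst : ∀ i (hi : i < rooms.length), rooms[i] = en → j ≤ i := by
        intro i hi hieq
        have hib : i ∈ b1.map Prod.snd := by
          rcases (hmem i).mp hi with hif | hib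
          · rw [hcase] at hif; simp at hif
          · exact hib
        obtain ⟨p, hpmem, hpsnd⟩ := List.mem_map.mp hib
        have hval : rooms.getD i 0 = p.1 := by rw [← hpsnd]; exact h1 p hpmem
        rw [List.getD_eq_getElem _ _ hi, hieq] at hval
        rw [hbcase] at hpmem
        rcases List.mem_cons.mp hpmem with heq | hp'
        · rw [heq] at hpsnd; simp at hpsnd; omega
        · have hlt := (List.pairwise_cons.mp (hbcase ▸ h3)).1 p hp'
          simp only [pvLtP, decide_eq_true_eq] at hlt
          omega
      -- min(rooms) = en
      have hmv : PySem.List.min? rooms (fun x => x) = some en := by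
        cases hm : PySem.List.min? rooms (fun x => x) with
        | none => exact absurd ((PySem.List.min?_eq_none_iff _ _).mp hm) hne
        | some mv =>
          have hmvmem : mv ∈ rooms := PySem.List.min?_mem hm
          obtain ⟨i, hi, hieq⟩ := List.mem_iff_getElem.mp hmvmem
          have h1' : en ≤ mv := by rw [← hieq]; exact hmin i hi
          have h2' : mv ≤ en := by
            have : en ∈ rooms := by
              rw [← hjval, List.getD_eq_getElem _ _ hjlen]
              exact List.getElem_mem hjlen
            exact PySem.List.min?_isMin hm en this
          rw [le_antisymm h1' h2']
      -- rooms.index(en) = j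
      have hix : PySem.List.index? rooms en = some j := by
        cases hk : PySem.List.index? rooms en with
        | none =>
          exfalso
          apply (PySem.List.index?_eq_none_iff _ _).mp hk
          rw [← hjval, List.getD_eq_getElem _ _ hjlen]
          exact List.getElem_mem hjlen
        | some k =>
          obtain ⟨hkL, hkv, hkfirst⟩ := PySem.List.getElem_of_index?_eq_some hk
          have hjk : j ≤ k := hminfirst k hkL hkv
          have hkj : ¬ j < k := by
            intro hlt
            exact hkfirst j hlt (by rw [← List.getD_eq_getElem _ _ hjlen, hjval])
          rw [show k = j by omega]
      have hA : pvStepA s e rooms = (rooms.set j (rooms.getD j 0 + (e - s)), j) := by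
        rw [pvStepA, hfind]; simp only [hmv, hix, Option.getD_some]
      have hB : pvStepB (busy, free, freq) m =
          (pvIns pvLtP brest (en + e - s, j), [], freq.set j (freq.getD j 0 + 1)) := by
        rw [pvStepB]; simp only [← hs, ← he, ← hb1, ← hf1, hcase, hbcase]
      rw [hA, hB]
      have hjnotb : ∀ p ∈ brest, p.2 ≠ j := by
        intro p hp hc
        have hnd : (b1.map Prod.snd).Nodup := (List.nodup_append.mp hnodup).2.1
        rw [hbcase] at hnd
        simp only [List.map_cons, List.nodup_cons] at hnd
        exact hnd.1 (List.mem_map.mpr ⟨p, hp, hc⟩)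
      refine ⟨rfl, ?_, ?_, ?_, List.Pairwise.nil, ?_⟩
      · intro p hp
        rcases List.mem_cons.mp ((pvIns_perm pvLtP (en + e - s, j) brest).mem_iff.mp hp) with
          rfl | hp'
        · simp only
          rw [pv_getD_set_self hjlen, hjval]; ring
        · rw [pv_getD_set_ne (fun hc => hjnotb p hp' hc.symm) _]
          exact h1 p (by simp [hbcase, hp'])
      · intro i hi; simp at hi
      · refine pvIns_pairwise pvLtP pvLtP_trans _ brest
          (List.pairwise_cons.mp (hbcase ▸ h3)).2 ?_
        intro y hy
        have := hjnotb y hy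
        simp only [pvLtP, decide_eq_true_eq]
        omega
      · rw [List.length_set]
        refine List.Perm.trans ?_ h5
        rw [hcase, hbcase]
        simpa using ((pvIns_perm pvLtP (en + e - s, j) brest).map Prod.snd)

theorem pvStepA_length (s e : Int) (rooms : List Int) :
    (pvStepA s e rooms).1.length = rooms.length := by
  unfold pvStepA
  cases List.findIdx? (fun r => decide (r ≤ s)) rooms <;> simp

-- the two folds produce the same frequency table
theorem pvFold_eq (ms : List (List Int)) :
    ∀ (rooms busy free freq : _) (t : Int), pvRel rooms busy free t → rooms ≠ [] →
      (∀ m' ∈ ms, t ≤ m'.getD 0 0) →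
      ms.Pairwise (fun a b => a.getD 0 0 ≤ b.getD 0 0) →
      (ms.foldl pvStepB (busy, free, freq)).2.2 = (ms.foldl pvFoldA (rooms, freq)).2 := by
  induction ms with
  | nil => intro rooms busy free freq t _ _ _ _; rfl
  | cons m ms ih =>
    intro rooms busy free freq t hrel hne hts hpw
    obtain ⟨hfr, hrel'⟩ := pvStep_eq rooms busy free freq t m hrel (hts m (by simp)) hne
    simp only [List.foldl_cons]
    have hB : (pvStepB (busy, free, freq) m) =
        ((pvStepB (busy, free, freq) m).1, (pvStepB (busy, free, freq) m).2.1,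
          (pvStepB (busy, free, freq) m).2.2) := rfl
    rw [hB, hfr]
    have hA : pvFoldA (rooms, freq) m =
        ((pvStepA (m.getD 0 0) (m.getD 1 0) rooms).1,
          freq.set (pvStepA (m.getD 0 0) (m.getD 1 0) rooms).2
            (freq.getD (pvStepA (m.getD 0 0) (m.getD 1 0) rooms).2 0 + 1)) := rfl
    rw [hA]
    refine ih _ _ _ _ (m.getD 0 0) hrel' ?_ ?_ (List.pairwise_cons.mp hpw).2
    · intro hnil
      have := pvStepA_length (m.getD 0 0) (m.getD 1 0) rooms
      rw [hnil] at this
      simp only [List.length_nil] at this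
      exact hne (List.length_eq_zero_iff.mp this.symm)
    · exact fun m' hm' => (List.pairwise_cons.mp hpw).1 m' hm'

-- Python's list comparison: the head of a ≤-smaller nonempty list is ≤
theorem pv_head_le {x y : Int} {l m : List Int} (h : (x :: l) ≤ (y :: m)) : x ≤ y := by
  rcases le_iff_lt_or_eq.mp h with h | h
  · rw [List.cons_lt_cons_iff] at h
    rcases h with h | ⟨h, _⟩
    · exact le_of_lt h
    · exact le_of_eq h
  · injection h with h1 _; exact le_of_eq h1

-- the initial states are related (any t works: free is empty)
theorem pvRel_init (k : Nat) (t : Int) :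
    pvRel (List.replicate k 0) ((List.range k).map (fun j => ((0 : Int), j))) [] t := by
  refine ⟨?_, by simp, ?_, List.Pairwise.nil, ?_⟩
  · intro p hp
    obtain ⟨j, hj, rfl⟩ := List.mem_map.mp hp
    simp only
    rw [List.getD_eq_getElem _ _ (by simpa using List.mem_range.mp hj)]
    simp
  · refine List.Pairwise.map _ ?_ List.pairwise_lt_range
    intro a b hab
    simp only [pvLtP, decide_eq_true_eq]
    exact Or.inr ⟨trivial, hab⟩
  · simp [List.map_map, Function.comp]

-- ===== VERDICT (by name: the statement is the Claim_ definition above) =====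
theorem solution_1662_3_1_spec : Claim_equal_solution_1662_3_1 := by
  intro n meetings _ hpre
  obtain ⟨hn, hlen⟩ := hpre
  unfold Spec_solution_1662_3_1 solution_1662_3_1 solution_1662_3_1_alt
  simp only
  have hk : 0 < n.toNat := by omega
  have hne : (List.replicate n.toNat (0 : Int)) ≠ [] := by
    simp only [ne_eq, List.replicate_eq_nil_iff]
    omega
  -- pairwise nondecreasing starts of the sorted meetings
  -- sorted_pairwise is stated for the LinearOrder-derived DecidableLT instance; the port's
  -- `sorted` uses the core one — identify them (Decidable is a subsingleton)
  have hpw' : (PySem.List.sorted meetings (fun x : List Int => x) false).Pairwise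
      (fun a b => a ≤ b) := by
    have h := PySem.List.sorted_pairwise (κ := List Int) meetings (fun x => x)
    have hi : (LinearOrder.toDecidableLT : DecidableLT (List Int)) =
        (fun a b => a.decidableLT b) := by
      funext a b; exact Subsingleton.elim _ _
    rw [hi] at h
    exact h
  have hpw : (PySem.List.sorted meetings (fun x => x) false).Pairwise
      (fun a b => a.getD 0 0 ≤ b.getD 0 0) := by
    refine hpw'.imp_of_mem ?_
    intro a b ha hb hab
    have ha2 : 2 ≤ a.length := hlen a ((PySem.List.mem_sorted _ _ _ _).mp ha)
    have hb2 : 2 ≤ b.length := hlen b ((PySem.List.mem_sorted _ _ _ _).mp hb)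
    cases a with
    | nil => simp at ha2
    | cons x l =>
      cases b with
      | nil => simp at hb2
      | cons y m =>
        simpa using pv_head_le hab
  cases hms : PySem.List.sorted meetings (fun x => x) false with
  | nil => rfl
  | cons m0 rest =>
    have hfold := pvFold_eq (m0 :: rest) (List.replicate n.toNat 0)
      ((List.range n.toNat).map (fun j => ((0 : Int), j))) [] (List.replicate n.toNat 0)
      (m0.getD 0 0) (pvRel_init n.toNat (m0.getD 0 0)) hne ?_ (hms ▸ hpw)
    · rw [hfold]
    · intro m' hm'
      rcases List.mem_cons.mp hm' with rfl | hm'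
      · exact le_refl _
      · exact (List.pairwise_cons.mp (hms ▸ hpw)).1 m' hm'
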